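-- pv_equiv track=rewrite | github.com/RaviShekhar13/learningpython | week-08/Mom_7.py | MoM7Pos
-- ===== SOURCE A (Python) =====
-- def MoM7Pos(arr):
--     if not arr:
--         return -1
--
--     n = len(arr)
--     if n == 1:
--         return 0
--
--     # Step 1: Divide into groups of 7 and find their medians
--     groups = [arr[i:i+7] for i in range(0, n, 7)]
--     medians = [sorted(group)[len(group)//2] for group in groups]
--
--     # Step 2: Find median of medians recursively
--     mom_value = MoM7_value(medians)
--
--     # Step 3: Find all positions of mom_value in original array
--     positions = [i for i, x in enumerate(arr) if x == mom_value]
--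
--     # Step 4: Determine which occurrence corresponds to the median position
--     less_count = sum(1 for x in arr if x < mom_value)
--
--     # The first mom_value that has exactly 'less_count' elements before it
--     current_less = 0
--     for i, x in enumerate(arr):
--         if x < mom_value:
--             current_less += 1
--         elif x == mom_value:
--             if current_less == less_count:
--                 return i
--
--     return positions[0] if positions else -1
--
-- def MoM7_value(arr):
--     """Helper function to compute just the median of medians value"""
--     if not arr:
--         return None
--     if len(arr) <= 7:
--         return sorted(arr)[len(arr)//2]
--
--     groups = [arr[i:i+7] for i in range(0, len(arr), 7)]
--     medians = [sorted(group)[len(group)//2] for group in groups]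
--     return MoM7_value(medians)
-- ===== SOURCE B (Python) =====
-- def MoM7Pos(arr):
--     if not arr:
--         return -1
--     n = len(arr)
--     if n == 1:
--         return 0
--     # condense iteratively: groups of 7 -> medians, until at most 7 remain
--     cur = [sorted(arr[i:i+7])[len(arr[i:i+7]) // 2] for i in range(0, n, 7)]
--     while len(cur) > 7:
--         cur = [sorted(cur[i:i+7])[len(cur[i:i+7]) // 2] for i in range(0, len(cur), 7)]
--     mom = sorted(cur)[len(cur) // 2]
--     # L = last index holding an element strictly below mom (-1 if none)
--     L = -1
--     for i, x in enumerate(arr):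
--         if x < mom:
--             L = i
--     # first occurrence of mom after L; fall back to the overall first occurrence
--     first = -1
--     for i, x in enumerate(arr):
--         if x == mom:
--             if first == -1:
--                 first = i
--             if i > L:
--                 return i
--     return first
-- ===== Notes on version B (the rewrite author's own statement) =====
-- stated objective: alternative
-- what changed: Replaces the recursive median-of-medians helper with an iterative condensation loop, and replaces A's running less-than counter (plus a separate positions list and count pass) with a precomputed last index of a strictly smaller element followed by a single scan that returns the first mom occurrence after it, falling back to the first occurrence.
import Mathlib
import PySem

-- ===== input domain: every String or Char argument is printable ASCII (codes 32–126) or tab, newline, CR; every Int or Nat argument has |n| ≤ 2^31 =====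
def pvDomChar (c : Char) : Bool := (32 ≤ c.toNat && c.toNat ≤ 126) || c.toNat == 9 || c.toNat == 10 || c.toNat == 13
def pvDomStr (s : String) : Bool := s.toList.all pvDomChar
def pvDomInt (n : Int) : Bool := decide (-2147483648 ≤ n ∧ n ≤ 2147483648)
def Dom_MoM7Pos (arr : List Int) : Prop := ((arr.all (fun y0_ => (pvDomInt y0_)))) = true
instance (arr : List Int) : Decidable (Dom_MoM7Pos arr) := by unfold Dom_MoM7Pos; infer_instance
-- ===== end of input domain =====

-- B replaces A's recursive median-of-medians helper by an iterative condensation loop and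
-- A's running-counter occurrence scan by a precomputed last-smaller-index plus one scan (objective: alternative).

-- ===== PORT A =====
-- the comprehension 'medians of the groups of 7' appears verbatim in both Pythons; shared helper
def pvMedians (l : List Int) : List Int :=
  let groups := (PySem.List.pyRange 0 (l.length : Int) 7).map
    (fun i => PySem.List.slice l (some i) (some (i + 7)))
  groups.map (fun g =>
    PySem.List.pyGetD (PySem.List.sorted g (fun x => x)) ((g.length : Int) / 2) 0)

-- needed by the termination proofs of MoM7_value / pvMomIter (cited in decreasing_by)
theorem pvMedians_length (l : List Int) : (pvMedians l).length = (l.length + 6) / 7 := by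
  unfold pvMedians
  rw [List.length_map, List.length_map, PySem.List.pyRange_of_pos 0 (l.length : Int) (by norm_num),
      List.length_map, List.length_range]
  split_ifs with h <;> omega

def MoM7_value (l : List Int) : Option Int :=
  if l = [] then none
  else if l.length ≤ 7 then
    some (PySem.List.pyGetD (PySem.List.sorted l (fun x => x)) ((l.length : Int) / 2) 0)
  else MoM7_value (pvMedians l)
termination_by l.length
decreasing_by have := pvMedians_length l; omega

def pvScanA (mom lc : Int) : List (Int × Int) → Int → Option Int
  | [], _ => none
  | (i, x) :: rest, c =>
    if x < mom then pvScanA mom lc rest (c + 1)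
    else if x = mom then
      (if c = lc then some i else pvScanA mom lc rest c)
    else pvScanA mom lc rest c

def MoM7Pos (arr : List Int) : Int :=
  if arr = [] then -1
  else if arr.length = 1 then 0
  else
    match MoM7_value (pvMedians arr) with
    | none => -1  -- unreachable: pvMedians arr ≠ [] when arr ≠ [] (Python would raise TypeError below on None)
    | some mom =>
      let positions := (PySem.List.enumerate arr 0).filterMap
        (fun p => if p.2 = mom then some p.1 else none)
      let lessCount : Int := arr.foldl (fun acc x => if x < mom then acc + 1 else acc) 0
      match pvScanA mom lessCount (PySem.List.enumerate arr 0) 0 with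
      | some i => i
      | none => positions.headD (-1)

-- ===== PORT B =====
def pvMomIter (cur : List Int) : Int :=
  if 7 < cur.length then pvMomIter (pvMedians cur)
  else PySem.List.pyGetD (PySem.List.sorted cur (fun x => x)) ((cur.length : Int) / 2) 0
termination_by cur.length
decreasing_by have := pvMedians_length cur; omega

def pvLastLess (mom : Int) : List (Int × Int) → Int → Int
  | [], l => l
  | (i, x) :: rest, l => pvLastLess mom rest (if x < mom then i else l)

def pvScanB (mom l : Int) : List (Int × Int) → Int → Int
  | [], first => first
  | (i, x) :: rest, first =>
    if x = mom then
      let first' := if first = -1 then i else first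
      if l < i then i else pvScanB mom l rest first'
    else pvScanB mom l rest first

def MoM7Pos_alt (arr : List Int) : Int :=
  if arr = [] then -1
  else if arr.length = 1 then 0
  else
    let mom := pvMomIter (pvMedians arr)
    let l := pvLastLess mom (PySem.List.enumerate arr 0) (-1)
    pvScanB mom l (PySem.List.enumerate arr 0) (-1)

-- ===== PRECONDITION & SPEC =====
def Spec_MoM7Pos (arr : List Int) (out : Int) : Prop := out = MoM7Pos_alt arr
instance (arr : List Int) (out : Int) : Decidable (Spec_MoM7Pos arr out) := by unfold Spec_MoM7Pos; infer_instance

-- ===== CLAIM (what is proved, stated in full; the proofs are below) =====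
def Claim_equal_MoM7Pos : Prop := ∀ (arr : List Int), Dom_MoM7Pos arr → Spec_MoM7Pos arr (MoM7Pos arr)

-- ===== LEMMAS AND PROOFS =====

theorem pvMedians_ne_nil {l : List Int} (h : l ≠ []) : pvMedians l ≠ [] := by
  have hl := pvMedians_length l
  have : l.length ≠ 0 := fun h0 => h (List.eq_nil_of_length_eq_zero h0)
  intro hnil
  rw [hnil] at hl
  simp at hl
  omega

-- A's recursive helper equals B's condensation loop on nonempty input
theorem mom_value_eq : ∀ (n : Nat) (l : List Int), l.length ≤ n → l ≠ [] →
    MoM7_value l = some (pvMomIter l) := by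
  intro n
  induction n with
  | zero => intro l hn hne; exact absurd (List.eq_nil_of_length_eq_zero (by omega)) hne
  | succ m ih =>
    intro l hn hne
    rw [MoM7_value, pvMomIter]
    by_cases h7 : l.length ≤ 7
    · simp [hne, h7, show ¬ 7 < l.length by omega]
    · have hlt : (pvMedians l).length < l.length := by have := pvMedians_length l; omega
      simp only [if_neg hne, if_neg h7, if_pos (show 7 < l.length by omega)]
      exact ih (pvMedians l) (by omega) (pvMedians_ne_nil hne)

-- A's fallback 'positions[0] if positions else -1' on the enumerated suffix
def fbEq (mom : Int) (l : List Int) (k : Int) : Int :=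
  ((PySem.List.enumerate l k).filterMap (fun p => if p.2 = mom then some p.1 else none)).headD (-1)

theorem lastLess_of_no_lt (mom : Int) : ∀ (l : List Int) (k L : Int),
    List.countP (fun x => decide (x < mom)) l = 0 →
    pvLastLess mom (PySem.List.enumerate l k) L = L := by
  intro l
  induction l with
  | nil => intro k L _; simp [PySem.List.enumerate_nil, pvLastLess]
  | cons x xs ih =>
    intro k L h
    rw [List.countP_cons] at h
    have hx : ¬ x < mom := by by_contra hc; simp [hc] at h
    rw [PySem.List.enumerate_cons, pvLastLess, if_neg hx]
    exact ih (k + 1) L (by omega)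

theorem lastLess_ge (mom : Int) : ∀ (l : List Int) (k L : Int),
    List.countP (fun x => decide (x < mom)) l ≠ 0 →
    k ≤ pvLastLess mom (PySem.List.enumerate l k) L := by
  intro l
  induction l with
  | nil => intro k L h; simp at h
  | cons x xs ih =>
    intro k L h
    rw [PySem.List.enumerate_cons, pvLastLess]
    by_cases hx : x < mom
    · rw [if_pos hx]
      by_cases hxs : List.countP (fun x => decide (x < mom)) xs = 0
      · rw [lastLess_of_no_lt mom xs (k + 1) k hxs]
      · have := ih (k + 1) k hxs; omega
    · rw [if_neg hx]
      rw [List.countP_cons] at h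
      have hxs : List.countP (fun x => decide (x < mom)) xs ≠ 0 := by
        simp [hx] at h; simpa using h
      have := ih (k + 1) L hxs; omega

-- the heart: A's counter scan (plus its fallback) equals B's last-smaller-index scan
theorem scan_eq (mom : Int) : ∀ (l : List Int) (k c L f : Int), 0 ≤ k → L < k →
    (match pvScanA mom (c + (List.countP (fun x => decide (x < mom)) l : Int))
        (PySem.List.enumerate l k) c with
     | some i => i
     | none => if f = -1 then fbEq mom l k else f)
    = pvScanB mom (pvLastLess mom (PySem.List.enumerate l k) L) (PySem.List.enumerate l k) f := by
  intro l
  induction l with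
  | nil =>
    intro k c L f hk hL
    simp only [PySem.List.enumerate_nil, pvScanA, pvScanB, pvLastLess]
    split_ifs with h
    · simp [fbEq, PySem.List.enumerate_nil, h]
    · rfl
  | cons x xs ih =>
    intro k c L f hk hL
    rw [PySem.List.enumerate_cons, List.countP_cons]
    by_cases hx : x < mom
    · have hxm : ¬ x = mom := by omega
      rw [pvScanA, if_pos hx, pvLastLess, if_pos hx, pvScanB, if_neg hxm]
      have harith : c + ((List.countP (fun x => decide (x < mom)) xs + if (fun x => decide (x < mom)) x = true then 1 else 0 : Nat) : Int)
          = (c + 1) + (List.countP (fun x => decide (x < mom)) xs : Int) := by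
        simp [hx]; ring
      rw [harith]
      have hfb : fbEq mom (x :: xs) k = fbEq mom xs (k + 1) := by
        simp [fbEq, PySem.List.enumerate_cons, hxm]
      rw [hfb]
      exact ih (k + 1) (c + 1) k f (by omega) (by omega)
    · by_cases hxm : x = mom
      · rw [pvScanA, if_neg hx, if_pos hxm, pvLastLess, if_neg hx, pvScanB, if_pos hxm]
        simp only [hx, decide_false, Bool.false_eq_true, if_false, Nat.add_zero]
        by_cases hc : List.countP (fun x => decide (x < mom)) xs = 0
        · -- no smaller element remains: A returns k; B's L stays < k so B returns k too
          have hceq : c = c + (List.countP (fun x => decide (x < mom)) xs : Int) := by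
            rw [hc]; simp
          rw [if_pos hceq, lastLess_of_no_lt mom xs (k + 1) L hc, if_pos hL]
        · -- a smaller element remains: A's counter is short; B's L is ≥ k + 1
          have hpos : (0 : Int) < (List.countP (fun x => decide (x < mom)) xs : Int) := by
            exact_mod_cast Nat.pos_of_ne_zero hc
          rw [if_neg (show ¬ c = c + (List.countP (fun x => decide (x < mom)) xs : Int) by omega)]
          have hLge := lastLess_ge mom xs (k + 1) L hc
          rw [if_neg (show ¬ pvLastLess mom (PySem.List.enumerate xs (k + 1)) L < k by omega)]
          have hfb : (if f = -1 then fbEq mom (x :: xs) k else f)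
              = (if (if f = -1 then k else f) = -1 then fbEq mom xs (k + 1) else (if f = -1 then k else f)) := by
            by_cases hf : f = -1
            · simp [hf, fbEq, PySem.List.enumerate_cons, hxm, show k ≠ -1 by omega]
            · simp [hf]
          rw [hfb]
          exact ih (k + 1) c L (if f = -1 then k else f) (by omega) (by omega)
      · rw [pvScanA, if_neg hx, if_neg hxm, pvLastLess, if_neg hx, pvScanB, if_neg hxm]
        have harith : c + ((List.countP (fun x => decide (x < mom)) xs + if (fun x => decide (x < mom)) x = true then 1 else 0 : Nat) : Int)
            = c + (List.countP (fun x => decide (x < mom)) xs : Int) := by simp [hx]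
        rw [harith]
        have hfb : fbEq mom (x :: xs) k = fbEq mom xs (k + 1) := by
          simp [fbEq, PySem.List.enumerate_cons, hxm]
        rw [hfb]
        exact ih (k + 1) c L f (by omega) (by omega)

-- ===== VERDICT (by name: the statement is the Claim_ definition above) =====
theorem MoM7Pos_spec : Claim_equal_MoM7Pos := by
  intro arr _
  unfold Spec_MoM7Pos MoM7Pos MoM7Pos_alt
  by_cases hnil : arr = []
  · simp [hnil]
  · by_cases h1 : arr.length = 1
    · simp [hnil, h1]
    · simp only [if_neg hnil, if_neg h1]
      have hval := mom_value_eq (pvMedians arr).length (pvMedians arr) le_rfl (pvMedians_ne_nil hnil)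
      simp only [hval]
      set mom := pvMomIter (pvMedians arr) with hmom
      have hcnt : arr.foldl (fun acc x => if x < mom then acc + 1 else acc) 0
          = 0 + (List.countP (fun x => decide (x < mom)) arr : Int) := by
        simpa using PySem.List.foldl_ite_add_one (fun x => x < mom) arr 0
      have hsc := scan_eq mom arr 0 0 (-1) (-1) (by omega) (by omega)
      simp only [if_true, fbEq] at hsc
      rw [hcnt]
      exact hsc
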